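-- pv_equiv track=rewrite | github.com/fedden/poker_ai | applications/strategy_dag_visualisation/create_dataset.py | _generate_action_combos
-- ===== SOURCE A (Python) =====
-- import itertools
--
-- def _generate_action_combos(base_path, level):
--     """
--     Helper function to generate all possible action combinations for a given
--     level of the DAG. Plus it eliminates invalid paths.
--     """
--     actions = ["fold", "raise", "call"]
--     combinations = itertools.product(actions, repeat=level)
--     paths = [f"{base_path}/{'/'.join(p)}" for p in combinations]
--     valid_paths = [
--         path
--         for path in paths
--         if (path.count("fold") - (1 if path.endswith("fold") else 0)) <= 2
--     ]
--     return valid_paths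
-- ===== SOURCE B (Python) =====
-- def _generate_action_combos(base_path, level):
--     """DFS over actions, pruning any subtree whose fold count can no longer
--     satisfy the filter; emits paths in the same order as itertools.product."""
--     actions = ["fold", "raise", "call"]
--     base_folds = base_path.count("fold")
--     results = []
--
--     def dfs(prefix, sep, remaining, folds, last_is_fold):
--         if remaining == 0:
--             if folds - (1 if last_is_fold else 0) <= 2:
--                 results.append(prefix)
--             return
--         if folds >= 4:
--             # even a trailing fold cannot bring the count back under the cap
--             return
--         for a in actions:
--             dfs(prefix + sep + a, "/", remaining - 1,
--                 folds + (1 if a == "fold" else 0), a == "fold")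
--
--     dfs(base_path + "/", "", level, base_folds, False)
--     return results
-- ===== Notes on version B (the rewrite author's own statement) =====
-- stated objective: alternative
-- what changed: Instead of materialising all 3^level action tuples, joining every one into a path string and filtering afterwards, B does a DFS over actions that tracks the fold count incrementally (seeded with base_path.count('fold')) and prunes a whole subtree as soon as the non-terminal fold budget is irrecoverably exceeded, emitting the surviving paths in product order; measured ~2x at level 16 but the output itself stays exponential, so no asymptotic speed claim is made.
import Mathlib
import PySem

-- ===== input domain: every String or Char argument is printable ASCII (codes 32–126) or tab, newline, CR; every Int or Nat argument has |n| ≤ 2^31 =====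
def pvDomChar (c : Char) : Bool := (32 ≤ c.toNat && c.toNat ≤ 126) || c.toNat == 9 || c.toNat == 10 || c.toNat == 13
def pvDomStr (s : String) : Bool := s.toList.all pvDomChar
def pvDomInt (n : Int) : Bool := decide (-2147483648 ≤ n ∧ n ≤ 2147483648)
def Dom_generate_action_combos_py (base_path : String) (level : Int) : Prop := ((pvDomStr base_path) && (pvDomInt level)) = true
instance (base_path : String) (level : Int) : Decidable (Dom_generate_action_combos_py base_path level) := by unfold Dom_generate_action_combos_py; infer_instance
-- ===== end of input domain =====

-- B replaces A's 'materialise all 3^level tuples, join, then filter' by a DFS over actions that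
-- carries the fold count incrementally and prunes subtrees whose fold budget is exceeded (same order).

-- ===== PORT A =====
def pvActions : List String := ["fold", "raise", "call"]

-- itertools.product(actions, repeat=n) as a list of token tuples, in product order
def pvProd : Nat → List (List String)
  | 0 => [([] : List String)]
  | n + 1 => pvActions.flatMap (fun a => (pvProd n).map (fun p => a :: p))

def generate_action_combos_py (base_path : String) (level : Int) : List String :=
  let combinations := pvProd level.toNat
  let paths := combinations.map (fun p => base_path ++ "/" ++ PySem.Str.join "/" p)
  paths.filter (fun path =>
    decide (((PySem.Str.count path "fold" : Int) -
      (if PySem.Str.endswith path "fold" then 1 else 0)) ≤ 2))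

-- ===== PORT B =====
def pvAltActions : List String := ["fold", "raise", "call"]

def pvAltDfs (pfx sep : String) (remaining : Nat) (folds : Int) (lastIsFold : Bool) :
    List String :=
  match remaining with
  | 0 => if folds - (if lastIsFold then 1 else 0) ≤ 2 then [pfx] else []
  | r + 1 =>
    if 4 ≤ folds then []
    else pvAltActions.flatMap (fun a =>
      pvAltDfs (pfx ++ sep ++ a) "/" r (folds + (if a == "fold" then 1 else 0)) (a == "fold"))

def generate_action_combos_py_alt (base_path : String) (level : Int) : List String :=
  pvAltDfs (base_path ++ "/") "" level.toNat (PySem.Str.count base_path "fold" : Int) false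

-- ===== PRECONDITION & SPEC =====
-- Python A raises ValueError (itertools.product with repeat < 0) exactly when level < 0.
def Pre_generate_action_combos_py (base_path : String) (level : Int) : Prop := 0 ≤ level
instance (base_path : String) (level : Int) : Decidable (Pre_generate_action_combos_py base_path level) := by unfold Pre_generate_action_combos_py; infer_instance
def pvWitness_generate_action_combos_py : String × Int := ("d", 2)

def Spec_generate_action_combos_py (base_path : String) (level : Int) (out : List String) : Prop := out = generate_action_combos_py_alt base_path level
instance (base_path : String) (level : Int) (out : List String) : Decidable (Spec_generate_action_combos_py base_path level out) := by unfold Spec_generate_action_combos_py; infer_instance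

-- ===== CLAIM (what is proved, stated in full; the proofs are below) =====
def Claim_equal_generate_action_combos_py : Prop := ∀ (base_path : String) (level : Int), Dom_generate_action_combos_py base_path level → Pre_generate_action_combos_py base_path level → Spec_generate_action_combos_py base_path level (generate_action_combos_py base_path level)

-- ===== LEMMAS AND PROOFS =====

def pvPat : List Char := ['f', 'o', 'l', 'd']

-- chars of the tail of '/'.join(p) after the leading token
def pvFlat (rest : List String) : List Char := rest.flatMap (fun b => '/' :: b.toList)

-- last token of the nonempty token list a :: rest
def pvLastTok (a : String) : List String → String
  | [] => a
  | b :: rr => pvLastTok b rr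

-- "does the token list end in a fold?" (lastIsFold = value for the empty list)
def pvLastFold (lastIsFold : Bool) : List String → Bool
  | [] => lastIsFold
  | a :: rest => pvLastTok a rest == "fold"

-- token-level filter predicate shared by both sides
def pvTokPred (folds : Int) (lastIsFold : Bool) (p : List String) : Bool :=
  decide (folds + (p.count "fold" : Int) - (if pvLastFold lastIsFold p then 1 else 0) ≤ 2)

-- the string B builds from pfx/sep and the remaining tokens
def pvJn (pfx sep : String) : List String → String
  | [] => pfx
  | a :: p => pvJn (pfx ++ sep ++ a) "/" p

-- ---- normalisation of PySem.Chars.count.go (accumulator and fuel) ----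
theorem pv_go_norm (sub : List Char) (hs : sub ≠ []) :
    ∀ n (l : List Char), l.length = n → ∀ fuel acc, l.length ≤ fuel →
      PySem.Chars.count.go sub fuel l acc = acc + PySem.Chars.count.go sub l.length l 0 := by
  intro n
  induction n using Nat.strong_induction_on with
  | _ n ih =>
    intro l hlen fuel acc hfuel
    match l, fuel with
    | [], fuel =>
      cases fuel <;> simp [PySem.Chars.count.go]
    | h :: t, 0 => simp at hfuel
    | h :: t, f + 1 =>
      simp only [List.length_cons] at hlen hfuel
      rw [PySem.Chars.count.go]
      by_cases hpre : sub.isPrefixOf (h :: t)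
      · have hsubpre : sub <+: (h :: t) := List.isPrefixOf_iff_prefix.mp hpre
        have hk1 : 1 ≤ sub.length := by
          cases sub with | nil => exact absurd rfl hs | cons a b => simp
        have hkle : sub.length ≤ t.length + 1 := by
          simpa using hsubpre.length_le
        have hdlen : (List.drop sub.length (h :: t)).length = t.length + 1 - sub.length := by
          simp
        simp only [hpre, if_true]
        rw [ih (t.length + 1 - sub.length) (by omega) _ hdlen f (acc + 1)
          (by simp only [List.length_drop, List.length_cons]; omega)]
        conv_rhs => rw [show (h :: t).length = t.length + 1 by simp, PySem.Chars.count.go]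
        simp only [hpre, if_true]
        rw [ih (t.length + 1 - sub.length) (by omega) _ hdlen t.length (0 + 1)
          (by simp only [List.length_drop, List.length_cons]; omega)]
        simp only [hdlen]
        omega
      · simp only [hpre, Bool.false_eq_true, if_false]
        rw [ih t.length (by omega) t rfl f acc (by omega)]
        conv_rhs => rw [show (h :: t).length = t.length + 1 by simp, PySem.Chars.count.go]
        simp only [hpre, Bool.false_eq_true, if_false]

-- ---- a pattern without '/' never matches across a '/' boundary ----
theorem pv_prefix_slash_iff (sub u v : List Char) (hnot : '/' ∉ sub) :
    sub <+: u ++ '/' :: v ↔ sub <+: u := by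
  constructor
  · intro h
    by_cases hlen : sub.length ≤ u.length
    · exact List.prefix_of_prefix_length_le h (List.prefix_append u ('/' :: v)) hlen
    · exfalso
      obtain ⟨r, hr⟩ := h
      have hu : u.length < sub.length := by omega
      have h2 : (u ++ '/' :: v)[u.length]'(by simp) = '/' := by
        rw [List.getElem_append_right (by omega)]
        simp
      have h1 : sub[u.length]'hu = '/' := by
        rw [← h2]
        have ha : sub[u.length]'hu = (sub ++ r)[u.length]'(by simp; omega) :=
          (List.getElem_append_left hu).symm
        have hb : (sub ++ r)[u.length]'(by simp; omega) = (u ++ '/' :: v)[u.length]'(by simp) :=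
          List.getElem_of_eq hr _
        exact ha.trans hb
      exact hnot (h1 ▸ List.getElem_mem hu)
  · intro h
    exact h.trans (List.prefix_append u ('/' :: v))

theorem pv_count_nil (sub : List Char) (hs : sub ≠ []) : PySem.Chars.count [] sub = 0 := by
  have : sub.isEmpty = false := by cases sub <;> simp_all
  simp [PySem.Chars.count, this, PySem.Chars.count.go]

theorem pv_count_cons (sub : List Char) (hs : sub ≠ []) (h : Char) (t : List Char) :
    PySem.Chars.count (h :: t) sub =
      if sub.isPrefixOf (h :: t) then
        PySem.Chars.count (List.drop sub.length (h :: t)) sub + 1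
      else PySem.Chars.count t sub := by
  have hemp : sub.isEmpty = false := by cases sub <;> simp_all
  have hk1 : 1 ≤ sub.length := by cases sub with | nil => simp_all | cons a b => simp
  simp only [PySem.Chars.count, hemp, Bool.false_eq_true, if_false]
  rw [show (h :: t).length = t.length + 1 by simp, PySem.Chars.count.go]
  by_cases hpre : sub.isPrefixOf (h :: t)
  · have hsubpre : sub <+: (h :: t) := List.isPrefixOf_iff_prefix.mp hpre
    have hkle : sub.length ≤ t.length + 1 := by simpa using hsubpre.length_le
    simp only [hpre, if_true]
    rw [pv_go_norm sub hs _ _ rfl t.length 1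
      (by simp only [List.length_drop, List.length_cons]; omega)]
    omega
  · simp only [hpre, Bool.false_eq_true, if_false]

-- ---- count splits at a '/' separator ----
theorem pv_count_append_slash (sub : List Char) (hs : sub ≠ []) (hnot : '/' ∉ sub) :
    ∀ n (u : List Char), u.length = n → ∀ v,
    PySem.Chars.count (u ++ '/' :: v) sub =
      PySem.Chars.count u sub + PySem.Chars.count v sub := by
  intro n
  induction n using Nat.strong_induction_on with
  | _ n ih =>
    intro u hlen v
    match u with
    | [] =>
      have hpre : sub.isPrefixOf ('/' :: v) = false := by
        cases sub with
        | nil => simp_all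
        | cons c cs =>
          simp only [List.mem_cons, not_or] at hnot
          simp [List.isPrefixOf, Ne.symm hnot.1]
      rw [List.nil_append, pv_count_cons sub hs, hpre, pv_count_nil sub hs]
      simp
    | h :: t =>
      simp only [List.length_cons] at hlen
      have hk1 : 1 ≤ sub.length := by cases sub with | nil => simp_all | cons a b => simp
      have hiff := pv_prefix_slash_iff sub (h :: t) v hnot
      by_cases hpre : sub.isPrefixOf (h :: t)
      · have hsubpre : sub <+: (h :: t) := List.isPrefixOf_iff_prefix.mp hpre
        have hkle : sub.length ≤ t.length + 1 := by simpa using hsubpre.length_le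
        have hpre2 : sub.isPrefixOf ((h :: t) ++ '/' :: v) = true := by
          rw [List.isPrefixOf_iff_prefix]
          exact hiff.mpr hsubpre
        rw [show (h :: t) ++ '/' :: v = h :: (t ++ '/' :: v) by simp,
          pv_count_cons sub hs, show h :: (t ++ '/' :: v) = (h :: t) ++ '/' :: v by simp,
          hpre2, if_pos rfl]
        rw [List.drop_append_of_le_length (by simpa using hkle)]
        rw [ih (List.drop sub.length (h :: t)).length
          (by simp only [List.length_drop, List.length_cons]; omega) _ rfl v]
        rw [pv_count_cons sub hs h t, hpre, if_pos rfl]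
        omega
      · have hpre2 : sub.isPrefixOf ((h :: t) ++ '/' :: v) = false := by
          rw [← Bool.not_eq_true, List.isPrefixOf_iff_prefix]
          intro hc
          exact hpre (List.isPrefixOf_iff_prefix.mpr (hiff.mp hc))
        rw [show (h :: t) ++ '/' :: v = h :: (t ++ '/' :: v) by simp,
          pv_count_cons sub hs, show h :: (t ++ '/' :: v) = (h :: t) ++ '/' :: v by simp,
          hpre2]
        simp only [Bool.false_eq_true, if_false]
        rw [ih t.length (by omega) t rfl v]
        rw [pv_count_cons sub hs h t]
        simp [hpre]

-- ---- counting folds token-wise ----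
theorem pv_tok_count (a : String) (ha : a ∈ pvActions) :
    PySem.Chars.count a.toList pvPat = if a == "fold" then 1 else 0 := by
  fin_cases ha <;> decide

theorem pv_count_tokens (rest : List String) :
    ∀ a, a ∈ pvActions → (∀ t ∈ rest, t ∈ pvActions) →
      PySem.Chars.count (a.toList ++ pvFlat rest) pvPat = (a :: rest).count "fold" := by
  induction rest with
  | nil =>
    intro a ha _
    simp only [pvFlat, List.flatMap_nil, List.append_nil, List.count_cons, List.count_nil]
    rw [pv_tok_count a ha]
    fin_cases ha <;> decide
  | cons b rr ih =>
    intro a ha hmem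
    have hb : b ∈ pvActions := hmem b (by simp)
    have hrr : ∀ t ∈ rr, t ∈ pvActions := fun t ht => hmem t (by simp [ht])
    have hshape : a.toList ++ pvFlat (b :: rr) = a.toList ++ '/' :: (b.toList ++ pvFlat rr) := by
      simp [pvFlat]
    rw [hshape, pv_count_append_slash pvPat (by decide) (by decide) _ _ rfl,
      pv_tok_count a ha, ih b hb hrr]
    simp only [List.count_cons]
    by_cases h : a = "fold" <;> simp [h] <;> omega

-- ---- endswith token-wise ----
theorem pv_endswith_append (u t pat : List Char) (hlen : pat.length ≤ t.length) :
    pat.isSuffixOf (u ++ t) = pat.isSuffixOf t := by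
  rw [Bool.eq_iff_iff, List.isSuffixOf_iff_suffix, List.isSuffixOf_iff_suffix]
  constructor
  · intro h
    exact List.suffix_of_suffix_length_le h (List.suffix_append u t) hlen
  · intro h
    exact h.trans (List.suffix_append u t)

theorem pv_endswith_tokens (rest : List String) :
    ∀ u (a : String), a ∈ pvActions → (∀ t ∈ rest, t ∈ pvActions) →
      PySem.Chars.endswith (u ++ a.toList ++ pvFlat rest) pvPat = (pvLastTok a rest == "fold") := by
  induction rest with
  | nil =>
    intro u a ha _
    simp only [pvFlat, List.flatMap_nil, List.append_nil, pvLastTok, PySem.Chars.endswith]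
    rw [pv_endswith_append u a.toList pvPat (by fin_cases ha <;> decide)]
    fin_cases ha <;> decide
  | cons b rr ih =>
    intro u a ha hmem
    have hb : b ∈ pvActions := hmem b (by simp)
    have hrr : ∀ t ∈ rr, t ∈ pvActions := fun t ht => hmem t (by simp [ht])
    have hshape : u ++ a.toList ++ pvFlat (b :: rr)
        = (u ++ a.toList ++ ['/']) ++ b.toList ++ pvFlat rr := by
      simp [pvFlat]
    rw [hshape, ih _ b hb hrr]
    rfl

theorem pv_endswith_slash (u : List Char) :
    PySem.Chars.endswith (u ++ ['/']) pvPat = false := by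
  simp only [PySem.Chars.endswith]
  rw [Bool.eq_false_iff]
  intro hc
  obtain ⟨w, hw⟩ := List.isSuffixOf_iff_suffix.mp hc
  have h1 : (w ++ pvPat).getLast? = some 'd' := by
    rw [show w ++ pvPat = (w ++ ['f','o','l']) ++ ['d'] by simp [pvPat]]
    exact List.getLast?_concat
  rw [hw] at h1
  rw [List.getLast?_concat] at h1
  simp at h1

-- ---- pvProd facts ----
theorem pv_mem_pvProd {n : Nat} {p : List String} (h : p ∈ pvProd n) : ∀ t ∈ p, t ∈ pvActions := by
  induction n generalizing p with
  | zero => simp [pvProd] at h; simp [h]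
  | succ n ih =>
    simp only [pvProd, List.mem_flatMap, List.mem_map] at h
    obtain ⟨a, ha, q, hq, rfl⟩ := h
    intro t ht
    rcases List.mem_cons.mp ht with rfl | ht
    · exact ha
    · exact ih hq t ht

-- ---- chars of the joined path ----
theorem pv_join_chars_nil : (PySem.Str.join "/" []).toList = [] := by
  simp [PySem.Str.toList_join, PySem.Chars.join, List.intercalate]

theorem pv_join_chars_cons (a : String) (rest : List String) :
    (PySem.Str.join "/" (a :: rest)).toList = a.toList ++ pvFlat rest := by
  rw [PySem.Str.toList_join]
  induction rest generalizing a with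
  | nil => simp [PySem.Chars.join, List.intercalate, pvFlat]
  | cons b rr ih =>
    rw [show List.map String.toList (a :: b :: rr) = a.toList :: b.toList :: List.map String.toList rr from rfl,
      PySem.Chars.join_cons_cons,
      show b.toList :: List.map String.toList rr = List.map String.toList (b :: rr) from rfl,
      ih b]
    simp [pvFlat, show "/".toList = ['/'] from rfl]

theorem pv_path_toList (base : String) (p : List String) :
    (base ++ "/" ++ PySem.Str.join "/" p).toList
      = base.toList ++ '/' :: (PySem.Str.join "/" p).toList := by
  rw [String.toList_append, String.toList_append]
  simp [show "/".toList = ['/'] from rfl]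

-- ---- A's string predicate is the token-level predicate ----
theorem pv_predA (base : String) (p : List String) (hp : ∀ t ∈ p, t ∈ pvActions) :
    decide (((PySem.Str.count (base ++ "/" ++ PySem.Str.join "/" p) "fold" : Int) -
        (if PySem.Str.endswith (base ++ "/" ++ PySem.Str.join "/" p) "fold" then 1 else 0)) ≤ 2)
      = pvTokPred (PySem.Str.count base "fold" : Int) false p := by
  have hpatL : "fold".toList = pvPat := rfl
  rw [PySem.Str.count_eq, PySem.Str.endswith_eq, PySem.Str.count_eq, hpatL, pv_path_toList]
  cases p with
  | nil =>
    rw [pv_join_chars_nil]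
    rw [show base.toList ++ '/' :: ([] : List Char) = base.toList ++ ['/'] from rfl]
    have hc : PySem.Chars.count (base.toList ++ ['/']) pvPat
        = PySem.Chars.count base.toList pvPat := by
      rw [show (['/'] : List Char) = '/' :: [] from rfl,
        pv_count_append_slash pvPat (by decide) (by decide) _ _ rfl,
        pv_count_nil pvPat (by decide)]
      omega
    rw [hc, pv_endswith_slash]
    simp [pvTokPred, pvLastFold]
  | cons a rest =>
    have ha : a ∈ pvActions := hp a (by simp)
    have hrest : ∀ t ∈ rest, t ∈ pvActions := fun t ht => hp t (by simp [ht])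
    rw [pv_join_chars_cons]
    have hc : PySem.Chars.count (base.toList ++ '/' :: (a.toList ++ pvFlat rest)) pvPat
        = PySem.Chars.count base.toList pvPat + (a :: rest).count "fold" := by
      rw [pv_count_append_slash pvPat (by decide) (by decide) _ _ rfl,
        pv_count_tokens rest a ha hrest]
    have he : PySem.Chars.endswith (base.toList ++ '/' :: (a.toList ++ pvFlat rest)) pvPat
        = (pvLastTok a rest == "fold") := by
      rw [show base.toList ++ '/' :: (a.toList ++ pvFlat rest)
          = (base.toList ++ ['/']) ++ a.toList ++ pvFlat rest by simp]
      exact pv_endswith_tokens rest _ a ha hrest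
    rw [hc, he]
    simp only [pvTokPred, pvLastFold]
    rw [decide_eq_decide]
    split_ifs <;> push_cast <;> omega

-- ---- B's DFS is filter-then-map over the product ----
theorem pv_tokPred_cons (folds : Int) (last : Bool) (a : String) (p : List String) :
    pvTokPred folds last (a :: p)
      = pvTokPred (folds + (if a == "fold" then 1 else 0)) (a == "fold") p := by
  have hl : pvLastFold last (a :: p) = pvLastFold (a == "fold") p := by
    cases p <;> rfl
  simp only [pvTokPred, hl, List.count_cons]
  rw [decide_eq_decide]
  by_cases h : a = "fold" <;> simp [h] <;> push_cast <;> omega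

theorem pv_altDfs_eq (n : Nat) :
    ∀ (pfx sep : String) (folds : Int) (last : Bool),
      pvAltDfs pfx sep n folds last
        = ((pvProd n).filter (pvTokPred folds last)).map (pvJn pfx sep) := by
  induction n with
  | zero =>
    intro pfx sep folds last
    have ht : pvTokPred folds last [] = decide (folds - (if last then 1 else 0) ≤ 2) := by
      simp only [pvTokPred, pvLastFold, List.count_nil]
      rw [decide_eq_decide]
      split_ifs <;> omega
    simp only [pvAltDfs, pvProd, List.filter_cons, List.filter_nil, ht]
    by_cases h : folds - (if last then 1 else 0) ≤ 2
    · simp [h, pvJn]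
    · simp [h]
  | succ n ih =>
    intro pfx sep folds last
    rw [pvAltDfs]
    by_cases h4 : (4 : Int) ≤ folds
    · rw [if_pos h4]
      have hnil : (pvProd (n + 1)).filter (pvTokPred folds last) = [] := by
        apply List.filter_eq_nil_iff.mpr
        intro p _
        simp only [pvTokPred, Bool.not_eq_true, decide_eq_false_iff_not]
        have : (0 : Int) ≤ (p.count "fold" : Int) := by positivity
        split_ifs <;> omega
      rw [hnil]
      rfl
    · rw [if_neg h4]
      have key : ∀ a : String,
          pvAltDfs (pfx ++ sep ++ a) "/" n (folds + (if a == "fold" then 1 else 0)) (a == "fold")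
            = ((pvProd n).filter (fun p => pvTokPred folds last (a :: p))).map
                (fun p => pvJn pfx sep (a :: p)) := by
        intro a
        rw [ih]
        have hf : ((pvProd n).filter (fun p => pvTokPred folds last (a :: p)))
            = (pvProd n).filter (pvTokPred (folds + (if a == "fold" then 1 else 0)) (a == "fold")) := by
          apply List.filter_congr
          intro p _
          exact pv_tokPred_cons folds last a p
        rw [hf]
        apply List.map_congr_left
        intro p _
        rfl
      conv_rhs => rw [pvProd]
      simp only [pvActions, pvAltActions, List.flatMap_cons, List.flatMap_nil, List.append_nil,
        List.filter_append, List.map_append, List.filter_map, List.map_map]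
      rw [key "fold", key "raise", key "call"]
      rfl

-- ---- B's built string equals A's built string ----
theorem pv_jn_chars (p : List String) :
    ∀ pfx : String, (pvJn pfx "/" p).toList = pfx.toList ++ pvFlat p := by
  induction p with
  | nil => intro pfx; simp [pvJn, pvFlat]
  | cons a rest ih =>
    intro pfx
    rw [show pvJn pfx "/" (a :: rest) = pvJn (pfx ++ "/" ++ a) "/" rest from rfl, ih]
    simp [pvFlat, String.toList_append, show "/".toList = ['/'] from rfl]

theorem pv_jn_eq_path (base : String) (p : List String) :
    pvJn (base ++ "/") "" p = base ++ "/" ++ PySem.Str.join "/" p := by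
  apply String.toList_inj.mp
  cases p with
  | nil =>
    rw [pv_path_toList, pv_join_chars_nil]
    simp [pvJn, String.toList_append, show "/".toList = ['/'] from rfl]
  | cons a rest =>
    rw [show pvJn (base ++ "/") "" (a :: rest) = pvJn (base ++ "/" ++ "" ++ a) "/" rest from rfl,
      pv_jn_chars, pv_path_toList, pv_join_chars_cons]
    simp [String.toList_append, show "/".toList = ['/'] from rfl]

-- ===== VERDICT (by name: the statement is the Claim_ definition above) =====
theorem generate_action_combos_py_spec : Claim_equal_generate_action_combos_py := by
  intro base level _ _
  unfold Spec_generate_action_combos_py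
  unfold generate_action_combos_py generate_action_combos_py_alt
  rw [pv_altDfs_eq, List.filter_map]
  simp only [Function.comp_def]
  rw [List.filter_congr (fun p hp => pv_predA base p (pv_mem_pvProd hp))]
  apply List.map_congr_left
  intro p _
  exact (pv_jn_eq_path base p).symm
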